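-- pv_equiv track=rewrite | github.com/GaeMungGun/2023_TGwinG_FE_SongMyeongGeun | SongMyeongGeun_4week_assignment.py | beerRefrigerator
-- ===== SOURCE A (Python) =====
-- def beerRefrigerator(n):
--     count = 0
--
--     surface_area = []
--     surface_area_str = []
--     divisor_list = [i for i in range(1, n+1) if n % i == 0]
--
--     for i in range(len(divisor_list)):
--         for j in range(len(divisor_list)):
--             for k in range(len(divisor_list)):
--                 if (divisor_list[i] * divisor_list[j] * divisor_list[k] == n):
--                     x = divisor_list[i]
--                     y = divisor_list[j]
--                     z = divisor_list[k]
--                     surface_area.append(x * y * 2 + y * z * 2 + z * x * 2)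
--                     a = str(x)
--                     b = str(y)
--                     c = str(z)
--                     surface_area_str.append(c + ' X ' + b + ' X ' + a)
--
--     while True:
--         if (min(surface_area) == surface_area[count]):
--             break
--         else:
--             count += 1
--
--     return surface_area_str[count]
-- ===== SOURCE B (Python) =====
-- def beerRefrigerator(n):
--     # divisors of n in increasing order, found in O(sqrt(n))
--     small = []
--     large = []
--     i = 1
--     while i * i <= n:
--         if n % i == 0:
--             small.append(i)
--             if i * i != n:
--                 large.append(n // i)
--         i += 1
--     divisors = small + large[::-1]
--     best_area = None
--     best_str = None
--     for x in divisors: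
--         for y in divisors:
--             if n % (x * y) == 0:
--                 z = n // (x * y)
--                 area = (x * y + y * z + z * x) * 2
--                 if best_area is None or area < best_area:
--                     best_area = area
--                     best_str = str(z) + ' X ' + str(y) + ' X ' + str(x)
--     return best_str
-- ===== Notes on version B (the rewrite author's own statement) =====
-- stated objective: faster
-- what changed: B enumerates divisors in O(sqrt(n)) (small divisors plus their cofactors) instead of a full scan up to n, and replaces A's O(d^3) scan over all divisor triples plus a separate min-index pass by an O(d^2) scan over divisor pairs (x,y) that recovers z = n // (x*y) by division and keeps a running first minimum.
-- outside the precondition, e.g. on beerRefrigerator(0): A raises ValueError, B returns None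
import Mathlib
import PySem

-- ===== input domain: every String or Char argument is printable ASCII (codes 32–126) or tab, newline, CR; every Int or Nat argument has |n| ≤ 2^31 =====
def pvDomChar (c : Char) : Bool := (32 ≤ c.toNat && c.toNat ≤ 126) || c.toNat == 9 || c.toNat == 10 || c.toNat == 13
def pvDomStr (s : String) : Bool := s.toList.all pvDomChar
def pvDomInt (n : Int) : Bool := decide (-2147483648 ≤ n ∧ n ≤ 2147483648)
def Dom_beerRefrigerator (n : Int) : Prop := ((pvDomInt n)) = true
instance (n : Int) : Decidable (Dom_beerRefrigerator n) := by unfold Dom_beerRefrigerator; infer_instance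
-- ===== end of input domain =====

-- B finds the divisors in O(sqrt n) (small divisors and their cofactors) instead of an O(n)
-- scan, and replaces A's cubic scan over divisor triples plus a final min-index pass by a
-- quadratic scan over divisor pairs (z recovered by division) keeping a running first minimum.

-- ===== PORT A =====
-- the while loop walks count upward until surface_area[count] equals the min, then returns
-- surface_area_str[count]; ported as a lockstep walk of the two (equal-length) lists.
-- The `""` branches are the points where Python raises (ValueError on min([]), IndexError):
-- unreachable under Pre_.
def pvWhileReturn (m : Int) : List Int → List String → String
  | a :: t, s :: u => if a == m then s else pvWhileReturn m t u
  | _, _ => ""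

def beerRefrigerator (n : Int) : String :=
  let divisor_list : List Int :=
    (PySem.List.pyRange 1 (n + 1) 1).filter (fun i => PySem.Int.mod n i == 0)
  let p : List Int × List String :=
    divisor_list.foldl (fun acc x =>
      divisor_list.foldl (fun acc y =>
        divisor_list.foldl (fun acc z =>
          if x * y * z == n then
            (acc.1 ++ [x * y * 2 + y * z * 2 + z * x * 2],
             acc.2 ++ [PySem.Int.toStr z ++ " X " ++ PySem.Int.toStr y ++ " X " ++ PySem.Int.toStr x])
          else acc) acc) acc) ([], [])
  match PySem.List.min? p.1 (fun v => v) with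
  | none => ""
  | some m => pvWhileReturn m p.1 p.2

-- ===== PORT B =====
-- termination of B's `while i * i <= n` loop: i*(i-1) >= 0 for integers, so i*i <= n -> i <= n
theorem pv_sq_le_imp_le {i n : Int} (h : i * i ≤ n) : i ≤ n := by
  by_cases hi : i ≤ 0
  · nlinarith [mul_self_nonneg i]
  · nlinarith [mul_nonneg (by omega : (0:Int) ≤ i - 1) (by omega : (0:Int) ≤ i)]

-- B's while loop: collect small divisors (i*i <= n) and their cofactors n // i (when i*i != n)
def pvDivLoop (n i : Int) (small large : List Int) : List Int × List Int :=
  if h : i * i ≤ n then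
    if PySem.Int.mod n i == 0 then
      if i * i == n then pvDivLoop n (i + 1) (small ++ [i]) large
      else pvDivLoop n (i + 1) (small ++ [i]) (large ++ [PySem.Int.floordiv n i])
    else pvDivLoop n (i + 1) small large
  else (small, large)
termination_by (n + 1 - i).toNat
decreasing_by all_goals (have := pv_sq_le_imp_le h; omega)

def beerRefrigerator_alt (n : Int) : String :=
  let p := pvDivLoop n 1 [] []
  let divisors : List Int := p.1 ++ p.2.reverse  -- small + large[::-1]
  let best : Option (Int × String) :=
    divisors.foldl (fun best x =>
      divisors.foldl (fun best y =>
        if PySem.Int.mod n (x * y) == 0 then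
          let z := PySem.Int.floordiv n (x * y)
          let area := (x * y + y * z + z * x) * 2
          let s := PySem.Int.toStr z ++ " X " ++ PySem.Int.toStr y ++ " X " ++ PySem.Int.toStr x
          match best with
          | none => some (area, s)
          | some b => if area < b.1 then some (area, s) else some b
        else best) best) none
  -- Python B returns best_str, which is None (not a str) when no triple exists (n < 1): outside Pre_.
  match best with
  | none => ""
  | some b => b.2

-- ===== PRECONDITION & SPEC =====
-- Pre_ excludes n < 1: there divisor_list is empty and Python A raises ValueError on min([]).
def Pre_beerRefrigerator (n : Int) : Prop := 1 ≤ n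
instance (n : Int) : Decidable (Pre_beerRefrigerator n) := by unfold Pre_beerRefrigerator; infer_instance
def pvWitness_beerRefrigerator : Int := (12)

def Spec_beerRefrigerator (n : Int) (out : String) : Prop := out = beerRefrigerator_alt n
instance (n : Int) (out : String) : Decidable (Spec_beerRefrigerator n out) := by unfold Spec_beerRefrigerator; infer_instance

-- ===== CLAIM (what is proved, stated in full; the proofs are below) =====
def Claim_equal_beerRefrigerator : Prop := ∀ (n : Int), Dom_beerRefrigerator n → Pre_beerRefrigerator n → Spec_beerRefrigerator n (beerRefrigerator n)

-- ===== LEMMAS AND PROOFS =====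

-- the divisor list both programs build
def pvDs (n : Int) : List Int :=
  (PySem.List.pyRange 1 (n + 1) 1).filter (fun i => PySem.Int.mod n i == 0)

-- the candidate produced for a pair (x, y) in B (at most one z)
def pvCand (n x y : Int) : List (Int × String) :=
  if PySem.Int.mod n (x * y) == 0 then
    [((x * y + y * (PySem.Int.floordiv n (x * y)) + (PySem.Int.floordiv n (x * y)) * x) * 2,
      PySem.Int.toStr (PySem.Int.floordiv n (x * y)) ++ " X " ++ PySem.Int.toStr y ++ " X " ++ PySem.Int.toStr x)]
  else []

def pvC (n : Int) : List (Int × String) :=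
  (pvDs n).flatMap (fun x => (pvDs n).flatMap (fun y => pvCand n x y))

def pvStep (best : Option (Int × String)) (c : Int × String) : Option (Int × String) :=
  match best with
  | none => some c
  | some b => if c.1 < b.1 then some c else some b

def pvPick (c : Int × String) : List (Int × String) → Int × String
  | [] => c
  | d :: t => pvPick (if d.1 < c.1 then d else c) t

theorem pvMem_ds (n z : Int) : z ∈ pvDs n ↔ (1 ≤ z ∧ z < n + 1 ∧ PySem.Int.mod n z = 0) := by
  simp [pvDs, List.mem_filter, PySem.List.mem_pyRange_one, and_assoc]

theorem pvNodup_ds (n : Int) : (pvDs n).Nodup :=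
  (PySem.List.nodup_pyRange_one 1 (n+1)).filter _

theorem pvFilter_singleton {α} (p : α → Bool) (z0 : α) : ∀ (l : List α), l.Nodup → z0 ∈ l → p z0 = true →
    (∀ z ∈ l, p z = true → z = z0) → l.filter p = [z0] := by
  intro l
  induction l with
  | nil => intro _ h; cases h
  | cons a t ih =>
    intro hnd hmem hp huniq
    rcases List.mem_cons.mp hmem with h | h
    · subst h
      have ht : t.filter p = [] := by
        apply List.filter_eq_nil_iff.mpr
        intro z hz hpz
        have := huniq z (List.mem_cons_of_mem _ hz) hpz
        subst this
        exact ((List.nodup_cons.mp hnd).1 hz)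
      simp [hp, ht]
    · have hpa : p a = false := by
        by_contra hc
        have : a = z0 := huniq a (List.mem_cons_self) (by revert hc; cases p a <;> simp)
        subst this
        exact ((List.nodup_cons.mp hnd).1 h)
      rw [List.filter_cons_of_neg (by simp [hpa])]
      exact ih (List.nodup_cons.mp hnd).2 h hp (fun z hz => huniq z (List.mem_cons_of_mem _ hz))

-- A's inner z-filter is exactly B's candidate test
theorem pvFilter_cand (n x y : Int) (hn : 1 ≤ n) (hx : x ∈ pvDs n) (hy : y ∈ pvDs n) :
    (pvDs n).filter (fun z => x * y * z == n) =
      if PySem.Int.mod n (x * y) == 0 then [PySem.Int.floordiv n (x * y)] else [] := by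
  obtain ⟨hx1, -, -⟩ := (pvMem_ds n x).mp hx
  obtain ⟨hy1, -, -⟩ := (pvMem_ds n y).mp hy
  have hp : (0:Int) < x * y := by positivity
  by_cases hdvd : x * y ∣ n
  · have hmod : PySem.Int.mod n (x * y) = 0 := (PySem.Int.mod_eq_zero_iff_dvd n (x*y)).mpr hdvd
    have hz0 : PySem.Int.floordiv n (x * y) = n / (x * y) := PySem.Int.floordiv_eq_ediv_of_pos hp
    set z0 := n / (x * y) with hz0def
    have hzmul : x * y * z0 = n := Int.mul_ediv_cancel' hdvd
    have hz01 : 1 ≤ z0 := by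
      rcases hdvd with ⟨c, hc⟩
      have hc' : z0 = c := by rw [hz0def, hc]; exact Int.mul_ediv_cancel_left c (by positivity)
      nlinarith [hc, hc']
    have hz0mem : z0 ∈ pvDs n := by
      rw [pvMem_ds]
      refine ⟨hz01, by nlinarith, (PySem.Int.mod_eq_zero_iff_dvd n z0).mpr ⟨x * y, by linarith [hzmul.symm]⟩⟩
    rw [hmod]
    simp only [beq_iff_eq] at *
    rw [hz0]
    apply pvFilter_singleton _ _ _ (pvNodup_ds n) hz0mem (by simp [hzmul])
    intro z hz hzeq
    simp only [beq_iff_eq] at hzeq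
    have : x * y * z = x * y * z0 := by rw [hzeq, hzmul]
    exact mul_left_cancel₀ (by positivity) this
  · have hmod : ¬ PySem.Int.mod n (x * y) = 0 := fun h => hdvd ((PySem.Int.mod_eq_zero_iff_dvd n (x*y)).mp h)
    simp only [beq_iff_eq, hmod, if_false]
    apply List.filter_eq_nil_iff.mpr
    intro z hz hzeq
    simp only [beq_iff_eq] at hzeq
    exact hmod ((PySem.Int.mod_eq_zero_iff_dvd n (x*y)).mpr ⟨z, by linarith [hzeq]⟩)

-- generic pair-accumulator fold shapes
theorem pvFoldl_pair_if {α β γ} (p : α → Bool) (f : α → β) (g : α → γ) :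
    ∀ (l : List α) (acc : List β × List γ),
      l.foldl (fun acc z => if p z then (acc.1 ++ [f z], acc.2 ++ [g z]) else acc) acc =
        (acc.1 ++ (l.filter p).map f, acc.2 ++ (l.filter p).map g) := by
  intro l
  induction l with
  | nil => intro acc; simp
  | cons a t ih =>
    intro acc
    by_cases h : p a = true
    · simp [List.foldl_cons, h, ih]
    · simp at h
      simp [List.foldl_cons, h, ih]

theorem pvFoldl_pair_flat {α β γ} (h1 : α → List β) (h2 : α → List γ) :
    ∀ (l : List α) (acc : List β × List γ),
      l.foldl (fun acc x => (acc.1 ++ h1 x, acc.2 ++ h2 x)) acc =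
        (acc.1 ++ l.flatMap h1, acc.2 ++ l.flatMap h2) := by
  intro l
  induction l with
  | nil => intro acc; simp
  | cons a t ih => intro acc; simp [List.foldl_cons, ih]

theorem pvFoldl_flat {α β γ} (f : β → γ → β) (g : α → List γ) :
    ∀ (l : List α) (b : β),
      l.foldl (fun b x => (g x).foldl f b) b = (l.flatMap g).foldl f b := by
  intro l
  induction l with
  | nil => intro b; simp
  | cons a t ih => intro b; simp [List.foldl_cons, List.flatMap_cons, List.foldl_append, ih]

-- A's nested loops build exactly the projections of the candidate list
theorem pvA_loops (n : Int) (hn : 1 ≤ n) :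
    (pvDs n).foldl (fun acc x =>
      (pvDs n).foldl (fun acc y =>
        (pvDs n).foldl (fun acc z =>
          if x * y * z == n then
            (acc.1 ++ [x * y * 2 + y * z * 2 + z * x * 2],
             acc.2 ++ [PySem.Int.toStr z ++ " X " ++ PySem.Int.toStr y ++ " X " ++ PySem.Int.toStr x])
          else acc) acc) acc) (([], []) : List Int × List String) =
      ((pvC n).map Prod.fst, (pvC n).map Prod.snd) := by
  have hxy : ∀ x ∈ pvDs n, ∀ y ∈ pvDs n, ∀ acc : List Int × List String,
      (pvDs n).foldl (fun acc z =>
        if x * y * z == n then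
          (acc.1 ++ [x * y * 2 + y * z * 2 + z * x * 2],
           acc.2 ++ [PySem.Int.toStr z ++ " X " ++ PySem.Int.toStr y ++ " X " ++ PySem.Int.toStr x])
        else acc) acc =
      (acc.1 ++ (pvCand n x y).map Prod.fst, acc.2 ++ (pvCand n x y).map Prod.snd) := by
    intro x hx y hy acc
    rw [pvFoldl_pair_if (fun z => x * y * z == n)
      (fun z => x * y * 2 + y * z * 2 + z * x * 2)
      (fun z => PySem.Int.toStr z ++ " X " ++ PySem.Int.toStr y ++ " X " ++ PySem.Int.toStr x) (pvDs n) acc,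
      pvFilter_cand n x y hn hx hy]
    by_cases h : PySem.Int.mod n (x * y) == 0
    · simp only [h, if_true, pvCand, List.map_cons, List.map_nil]
      have harea : x * y * 2 + y * PySem.Int.floordiv n (x * y) * 2 + PySem.Int.floordiv n (x * y) * x * 2
          = (x * y + y * PySem.Int.floordiv n (x * y) + PySem.Int.floordiv n (x * y) * x) * 2 := by ring
      rw [harea]
    · simp only [h, pvCand]
      simp
  have hx : ∀ x ∈ pvDs n, ∀ acc : List Int × List String,
      (pvDs n).foldl (fun acc y =>
        (pvDs n).foldl (fun acc z =>
          if x * y * z == n then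
            (acc.1 ++ [x * y * 2 + y * z * 2 + z * x * 2],
             acc.2 ++ [PySem.Int.toStr z ++ " X " ++ PySem.Int.toStr y ++ " X " ++ PySem.Int.toStr x])
          else acc) acc) acc =
      (acc.1 ++ ((pvDs n).flatMap (fun y => pvCand n x y)).map Prod.fst,
       acc.2 ++ ((pvDs n).flatMap (fun y => pvCand n x y)).map Prod.snd) := by
    intro x hxmem acc
    rw [PySem.List.foldl_congr_mem (pvDs n) _ (fun acc y =>
        (acc.1 ++ (pvCand n x y).map Prod.fst, acc.2 ++ (pvCand n x y).map Prod.snd)) acc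
        (fun acc y hy => hxy x hxmem y hy acc)]
    rw [pvFoldl_pair_flat]
    simp [List.map_flatMap]
  rw [PySem.List.foldl_congr_mem (pvDs n) _ (fun acc x =>
      (acc.1 ++ ((pvDs n).flatMap (fun y => pvCand n x y)).map Prod.fst,
       acc.2 ++ ((pvDs n).flatMap (fun y => pvCand n x y)).map Prod.snd)) ([], [])
      (fun acc x hx' => hx x hx' acc)]
  rw [pvFoldl_pair_flat]
  simp [pvC, List.map_flatMap]

-- B's nested loops are a fold of pvStep over the same candidate list
theorem pvB_loops (n : Int) :
    (pvDs n).foldl (fun best x =>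
      (pvDs n).foldl (fun best y =>
        if PySem.Int.mod n (x * y) == 0 then
          let z := PySem.Int.floordiv n (x * y)
          let area := (x * y + y * z + z * x) * 2
          let s := PySem.Int.toStr z ++ " X " ++ PySem.Int.toStr y ++ " X " ++ PySem.Int.toStr x
          match best with
          | none => some (area, s)
          | some b => if area < b.1 then some (area, s) else some b
        else best) best) (none : Option (Int × String)) =
      (pvC n).foldl pvStep none := by
  have hbody : ∀ x y (best : Option (Int × String)),
      (if PySem.Int.mod n (x * y) == 0 then
        let z := PySem.Int.floordiv n (x * y)
        let area := (x * y + y * z + z * x) * 2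
        let s := PySem.Int.toStr z ++ " X " ++ PySem.Int.toStr y ++ " X " ++ PySem.Int.toStr x
        match best with
        | none => some (area, s)
        | some b => if area < b.1 then some (area, s) else some b
      else best) = (pvCand n x y).foldl pvStep best := by
    intro x y best
    by_cases h : PySem.Int.mod n (x * y) == 0
    · cases best <;> simp [pvCand, h, pvStep]
    · cases best <;> simp [pvCand, h, pvStep]
  calc (pvDs n).foldl (fun best x =>
      (pvDs n).foldl (fun best y =>
        if PySem.Int.mod n (x * y) == 0 then
          let z := PySem.Int.floordiv n (x * y)
          let area := (x * y + y * z + z * x) * 2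
          let s := PySem.Int.toStr z ++ " X " ++ PySem.Int.toStr y ++ " X " ++ PySem.Int.toStr x
          match best with
          | none => some (area, s)
          | some b => if area < b.1 then some (area, s) else some b
        else best) best) (none : Option (Int × String))
      = (pvDs n).foldl (fun best x =>
          (pvDs n).foldl (fun best y => (pvCand n x y).foldl pvStep best) best) none := by
        apply PySem.List.foldl_congr_mem
        intro acc x _
        apply PySem.List.foldl_congr_mem
        intro best y _
        exact hbody x y best
    _ = (pvC n).foldl pvStep none := by
        rw [pvC]
        rw [← pvFoldl_flat pvStep (fun x => (pvDs n).flatMap (fun y => pvCand n x y))]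
        apply PySem.List.foldl_congr_mem
        intro best x _
        exact pvFoldl_flat pvStep (fun y => pvCand n x y) (pvDs n) best

theorem pvFoldl_step_some (t : List (Int × String)) : ∀ c, t.foldl pvStep (some c) = some (pvPick c t) := by
  induction t with
  | nil => intro c; simp [pvPick]
  | cons d t ih =>
    intro c
    show t.foldl pvStep (pvStep (some c) d) = _
    by_cases h : d.1 < c.1 <;> simp [pvStep, pvPick, h, ih]

-- running-min facts
theorem pvFmin_min (a b : Int) : ∀ (l : List Int), l.foldl min (min a b) = min a (l.foldl min b) := by
  intro l
  induction l generalizing b with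
  | nil => rfl
  | cons e t ih => simp only [List.foldl_cons, min_assoc, ih]

theorem pvFmin_le_self (a : Int) : ∀ (l : List Int), l.foldl min a ≤ a := by
  intro l
  induction l generalizing a with
  | nil => simp
  | cons e t ih => exact le_trans (ih (min a e)) (min_le_left a e)

theorem pvFmin_le_mem (a e : Int) : ∀ (l : List Int), e ∈ l → l.foldl min a ≤ e := by
  intro l
  induction l generalizing a with
  | nil => intro h; cases h
  | cons d t ih =>
    intro h
    rcases List.mem_cons.mp h with h | h
    · subst h; exact le_trans (pvFmin_le_self _ t) (min_le_right a e)
    · exact ih (min a d) h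

theorem pvFmin_mem_or (a : Int) : ∀ (l : List Int), l.foldl min a = a ∨ l.foldl min a ∈ l := by
  intro l
  induction l generalizing a with
  | nil => left; rfl
  | cons d t ih =>
    rcases ih (min a d) with h | h
    · simp only [List.foldl_cons, h]
      rcases min_cases a d with ⟨h1, _⟩ | ⟨h1, _⟩
      · left; exact h1
      · right; rw [h1]; exact List.mem_cons_self
    · right; exact List.mem_cons_of_mem d h

theorem pvPick_keep (c : Int × String) : ∀ (t : List (Int × String)), (∀ e ∈ t, ¬ e.1 < c.1) → pvPick c t = c := by
  intro t
  induction t generalizing c with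
  | nil => intro _; rfl
  | cons d t ih =>
    intro h
    have hd := h d List.mem_cons_self
    simp only [pvPick, if_neg hd]
    exact ih c (fun e he => h e (List.mem_cons_of_mem d he))

theorem pvPick_cong : ∀ (t : List (Int × String)) (c d : Int × String), c.1 ≤ d.1 →
    (∃ e ∈ t, e.1 < c.1) → pvPick c t = pvPick d t := by
  intro t
  induction t with
  | nil => rintro c d _ ⟨e, he, -⟩; cases he
  | cons a t ih =>
    rintro c d hle ⟨e, he, helt⟩
    by_cases ha : a.1 < c.1
    · simp only [pvPick, if_pos ha, if_pos (lt_of_lt_of_le ha hle)]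
    · have he' : e ∈ t := by
        rcases List.mem_cons.mp he with h | h
        · exact absurd (h ▸ helt) ha
        · exact h
      simp only [pvPick, if_neg ha]
      by_cases had : a.1 < d.1
      · rw [if_pos had]
        exact ih c a (le_of_not_gt ha) ⟨e, he', helt⟩
      · rw [if_neg had]
        exact ih c d hle ⟨e, he', helt⟩

-- A's min + while-loop extraction returns the snd of the running first-minimum
theorem pvWhile_pick : ∀ (t : List (Int × String)) (c : Int × String) (m : Int),
    m = (t.map Prod.fst).foldl min c.1 →
    pvWhileReturn m (((c :: t)).map Prod.fst) (((c :: t)).map Prod.snd) = (pvPick c t).2 := by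
  intro t
  induction t with
  | nil =>
    intro c m hm
    simp only [List.map_cons, List.map_nil, List.foldl_nil] at hm
    simp [pvWhileReturn, pvPick, hm]
  | cons d t ih =>
    intro c m hm
    simp only [List.map_cons, List.foldl_cons] at hm
    rw [pvFmin_min c.1 d.1 (t.map Prod.fst)] at hm
    set m' := (t.map Prod.fst).foldl min d.1 with hm'def
    by_cases hc : c.1 ≤ m'
    · have hmc : m = c.1 := by rw [hm]; exact min_eq_left hc
      have hkeep : pvPick c (d :: t) = c := by
        apply pvPick_keep
        intro e he
        rcases List.mem_cons.mp he with h | h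
        · have hd1 : m' ≤ d.1 := pvFmin_le_self d.1 (t.map Prod.fst)
          rw [h]; omega
        · have : m' ≤ e.1 := pvFmin_le_mem d.1 e.1 (t.map Prod.fst) (List.mem_map_of_mem h)
          omega
      rw [hkeep]
      simp [pvWhileReturn, hmc]
    · push_neg at hc
      have hmm : m = m' := by rw [hm]; exact min_eq_right (le_of_lt hc)
      have hne : ¬ (c.1 == m) := by simp [hmm]; omega
      show pvWhileReturn m (c.1 :: ((d :: t).map Prod.fst)) (c.2 :: ((d :: t).map Prod.snd)) = _
      rw [pvWhileReturn, if_neg (by simpa using hne)]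
      rw [ih d m (by rw [hmm])]
      by_cases hd : d.1 < c.1
      · simp only [pvPick, if_pos hd]
      · simp only [pvPick, if_neg hd]
        have hex : ∃ e ∈ t, e.1 < c.1 := by
          rcases pvFmin_mem_or d.1 (t.map Prod.fst) with h | h
          · rw [← hm'def] at h; omega
          · rw [← hm'def] at h
            rcases List.mem_map.mp h with ⟨e, he, he'⟩
            exact ⟨e, he, by omega⟩
        exact (congrArg Prod.snd (pvPick_cong t c d (le_of_not_gt hd) hex)).symm

theorem pvC_ne_nil (n : Int) (hn : 1 ≤ n) : pvC n ≠ [] := by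
  have h1 : (1:Int) ∈ pvDs n := by
    rw [pvMem_ds]
    refine ⟨le_refl 1, by omega, (PySem.Int.mod_eq_zero_iff_dvd n 1).mpr (one_dvd n)⟩
  have hcand : pvCand n 1 1 ≠ [] := by
    have : PySem.Int.mod n (1 * 1) = 0 := (PySem.Int.mod_eq_zero_iff_dvd n (1*1)).mpr (by simp)
    simp [pvCand, this]
  intro hC
  have : ∀ x ∈ pvDs n, ∀ y ∈ pvDs n, pvCand n x y = [] := by
    intro x hx y hy
    have := List.flatMap_eq_nil_iff.mp hC x hx
    exact List.flatMap_eq_nil_iff.mp this y hy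
  exact hcand (this 1 h1 1 h1)


-- ---- B's sqrt-divisor enumeration produces exactly A's divisor list ----

def pvR (n : Int) : Int := ((Nat.sqrt n.toNat : Nat) : Int) + 1

def pvSmallL (n i : Int) : List Int :=
  (PySem.List.pyRange i (pvR n) 1).filter (fun j => PySem.Int.mod n j == 0)

def pvLargeL (n i : Int) : List Int :=
  ((PySem.List.pyRange i (pvR n) 1).filter (fun j => PySem.Int.mod n j == 0 && !(j * j == n))).map
    (fun j => PySem.Int.floordiv n j)

theorem pvSq_iff (n j : Int) (hn : 1 ≤ n) (hj : 1 ≤ j) : j * j ≤ n ↔ j < pvR n := by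
  unfold pvR
  rcases Int.eq_ofNat_of_zero_le (show (0:Int) ≤ j by omega) with ⟨a, rfl⟩
  rcases Int.eq_ofNat_of_zero_le (show (0:Int) ≤ n by omega) with ⟨m, rfl⟩
  rw [Int.toNat_natCast]
  constructor
  · intro h
    have h2 : a * a ≤ m := by exact_mod_cast h
    have h3 : a ≤ Nat.sqrt m := Nat.le_sqrt.mpr h2
    exact Int.lt_add_one_iff.mpr (by exact_mod_cast h3)
  · intro h
    have h3 : a ≤ Nat.sqrt m := by exact_mod_cast Int.lt_add_one_iff.mp h
    exact_mod_cast Nat.le_sqrt.mp h3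

theorem pvCofactor_ge_one {n j : Int} (hn : 1 ≤ n) (hj : 1 ≤ j) (hd : j ∣ n) :
    1 ≤ n / j ∧ n / j ≤ n ∧ j * (n / j) = n := by
  have hmul : j * (n / j) = n := Int.mul_ediv_cancel' hd
  have h1 : 1 ≤ n / j := by
    by_contra hc
    push_neg at hc
    have : j * (n / j) ≤ 0 := mul_nonpos_of_nonneg_of_nonpos (by omega) (by omega)
    omega
  refine ⟨h1, ?_, hmul⟩
  calc n / j = 1 * (n / j) := (one_mul _).symm
    _ ≤ j * (n / j) := mul_le_mul_of_nonneg_right hj (by omega)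
    _ = n := hmul

theorem pvDivLoop_spec (n : Int) (hn : 1 ≤ n) :
    ∀ (k : Nat) (i : Int), 1 ≤ i → (n + 1 - i).toNat ≤ k →
      ∀ small large, pvDivLoop n i small large = (small ++ pvSmallL n i, large ++ pvLargeL n i) := by
  intro k
  induction k with
  | zero =>
    intro i hi hk small large
    have hsq : ¬ i * i ≤ n := fun h => by have := pv_sq_le_imp_le h; omega
    have hr : ¬ i < pvR n := fun h => hsq ((pvSq_iff n i hn hi).mpr h)
    have hnil : PySem.List.pyRange i (pvR n) 1 = [] := PySem.List.pyRange_one_eq_nil (by omega)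
    rw [pvDivLoop, dif_neg hsq]
    simp [pvSmallL, pvLargeL, hnil]
  | succ k ih =>
    intro i hi hk small large
    by_cases hsq : i * i ≤ n
    · have hin : i ≤ n := pv_sq_le_imp_le hsq
      have hr : i < pvR n := (pvSq_iff n i hn hi).mp hsq
      have hcons : PySem.List.pyRange i (pvR n) 1 = i :: PySem.List.pyRange (i+1) (pvR n) 1 :=
        PySem.List.pyRange_one_cons hr
      rw [pvDivLoop, dif_pos hsq]
      by_cases hm : PySem.Int.mod n i == 0
      · by_cases he : i * i == n
        · rw [if_pos hm, if_pos he, ih (i+1) (by omega) (by omega)]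
          simp [pvSmallL, pvLargeL, hcons, List.filter_cons, hm, he]
        · rw [if_pos hm, if_neg he, ih (i+1) (by omega) (by omega)]
          simp [pvSmallL, pvLargeL, hcons, List.filter_cons, hm, he]
      · rw [if_neg hm, ih (i+1) (by omega) (by omega)]
        simp [pvSmallL, pvLargeL, hcons, List.filter_cons, hm]
    · have hr : ¬ i < pvR n := fun h => hsq ((pvSq_iff n i hn hi).mpr h)
      have hnil : PySem.List.pyRange i (pvR n) 1 = [] := PySem.List.pyRange_one_eq_nil (by omega)
      rw [pvDivLoop, dif_neg hsq]
      simp [pvSmallL, pvLargeL, hnil]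

theorem pvMem_divB (n : Int) (hn : 1 ≤ n) (x : Int) :
    x ∈ pvSmallL n 1 ++ (pvLargeL n 1).reverse ↔ x ∈ pvDs n := by
  rw [List.mem_append, List.mem_reverse, pvMem_ds]
  constructor
  · rintro (hs | hl)
    · rw [pvSmallL, List.mem_filter, PySem.List.mem_pyRange_one] at hs
      obtain ⟨⟨h1, h2⟩, h3⟩ := hs
      have hsq : x * x ≤ n := (pvSq_iff n x hn h1).mpr h2
      have := pv_sq_le_imp_le hsq
      exact ⟨h1, by omega, by simpa using h3⟩
    · rw [pvLargeL, List.mem_map] at hl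
      obtain ⟨j, hj, rfl⟩ := hl
      rw [List.mem_filter, PySem.List.mem_pyRange_one] at hj
      obtain ⟨⟨hj1, hj2⟩, hj3⟩ := hj
      simp only [Bool.and_eq_true, beq_iff_eq, Bool.not_eq_true', beq_eq_false_iff_ne] at hj3
      obtain ⟨hjm, hjne⟩ := hj3
      have hdvd : j ∣ n := (PySem.Int.mod_eq_zero_iff_dvd n j).mp hjm
      have hfd : PySem.Int.floordiv n j = n / j := PySem.Int.floordiv_eq_ediv_of_pos (by omega)
      obtain ⟨hc1, hc2, hc3⟩ := pvCofactor_ge_one hn hj1 hdvd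
      rw [hfd]
      exact ⟨hc1, by omega, (PySem.Int.mod_eq_zero_iff_dvd n (n / j)).mpr ⟨j, by linarith [hc3]⟩⟩
  · rintro ⟨h1, h2, h3⟩
    have hdvd : x ∣ n := (PySem.Int.mod_eq_zero_iff_dvd n x).mp h3
    by_cases hsq : x * x ≤ n
    · left
      rw [pvSmallL, List.mem_filter, PySem.List.mem_pyRange_one]
      exact ⟨⟨h1, (pvSq_iff n x hn h1).mp hsq⟩, by simpa using h3⟩
    · right
      rw [pvLargeL, List.mem_map]
      obtain ⟨hc1, hc2, hc3⟩ := pvCofactor_ge_one hn h1 hdvd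
      set c := n / x with hcdef
      have hjx : c < x := by nlinarith [hc3]
      have hjj : c * c < n := by nlinarith [hc3]
      have hjd : c ∣ n := ⟨x, by linarith [hc3]⟩
      refine ⟨c, ?_, ?_⟩
      · rw [List.mem_filter, PySem.List.mem_pyRange_one]
        refine ⟨⟨hc1, (pvSq_iff n c hn hc1).mp (le_of_lt hjj)⟩, ?_⟩
        simp only [Bool.and_eq_true, beq_iff_eq, Bool.not_eq_true', beq_eq_false_iff_ne]
        exact ⟨(PySem.Int.mod_eq_zero_iff_dvd n c).mpr hjd, by omega⟩
      · have hfd : PySem.Int.floordiv n c = n / c :=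
          PySem.Int.floordiv_eq_ediv_of_pos (by omega)
        have hmul : c * x = n := by linarith [hc3]
        rw [hfd, ← hmul, Int.mul_ediv_cancel_left x (by omega)]

theorem pvLarge_anti (n : Int) (hn : 1 ≤ n) :
    ∀ (l : List Int), (∀ j ∈ l, 1 ≤ j ∧ j ∣ n) → l.Pairwise (· < ·) →
      (l.map (fun j => PySem.Int.floordiv n j)).Pairwise (fun a b => b < a) := by
  intro l
  induction l with
  | nil => intro _ _; simp
  | cons j t ih =>
    intro hmem hpw
    rw [List.map_cons, List.pairwise_cons]
    obtain ⟨hj1, hjd⟩ := hmem j List.mem_cons_self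
    rw [List.pairwise_cons] at hpw
    refine ⟨?_, ih (fun a ha => hmem a (List.mem_cons_of_mem _ ha)) hpw.2⟩
    intro b hb
    rw [List.mem_map] at hb
    obtain ⟨j', hj', rfl⟩ := hb
    obtain ⟨hj'1, hj'd⟩ := hmem j' (List.mem_cons_of_mem _ hj')
    have hlt : j < j' := hpw.1 j' hj'
    have hfd : PySem.Int.floordiv n j = n / j := PySem.Int.floordiv_eq_ediv_of_pos (by omega)
    have hfd' : PySem.Int.floordiv n j' = n / j' := PySem.Int.floordiv_eq_ediv_of_pos (by omega)
    obtain ⟨ha1, -, ha3⟩ := pvCofactor_ge_one hn hj1 hjd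
    obtain ⟨hb1, -, hb3⟩ := pvCofactor_ge_one hn hj'1 hj'd
    rw [hfd, hfd']
    nlinarith [ha3, hb3, mul_pos (show (0:Int) < j' - j by omega) (show (0:Int) < n / j' by omega)]

theorem pvDivB_eq (n : Int) (hn : 1 ≤ n) :
    (pvDivLoop n 1 [] []).1 ++ (pvDivLoop n 1 [] []).2.reverse = pvDs n := by
  rw [pvDivLoop_spec n hn (n + 1 - 1).toNat 1 (by omega) (by omega) [] []]
  simp only [List.nil_append]
  have hlmem : ∀ j ∈ (PySem.List.pyRange 1 (pvR n) 1).filter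
      (fun j => PySem.Int.mod n j == 0 && !(j * j == n)), 1 ≤ j ∧ j ∣ n := by
    intro j hj
    rw [List.mem_filter, PySem.List.mem_pyRange_one] at hj
    obtain ⟨⟨hj1, -⟩, hj3⟩ := hj
    simp only [Bool.and_eq_true, beq_iff_eq] at hj3
    exact ⟨hj1, (PySem.Int.mod_eq_zero_iff_dvd n j).mp hj3.1⟩
  have hsmall_pw : (pvSmallL n 1).Pairwise (· < ·) :=
    List.Pairwise.sublist List.filter_sublist (PySem.List.pairwise_lt_pyRange_one 1 (pvR n))
  have hlarge_pw : ((pvLargeL n 1).reverse).Pairwise (· < ·) := by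
    rw [List.pairwise_reverse]
    exact pvLarge_anti n hn _ hlmem
      (List.Pairwise.sublist List.filter_sublist (PySem.List.pairwise_lt_pyRange_one 1 (pvR n)))
  have hcross : ∀ a ∈ pvSmallL n 1, ∀ b ∈ (pvLargeL n 1).reverse, a < b := by
    intro a ha b hb
    rw [pvSmallL, List.mem_filter, PySem.List.mem_pyRange_one] at ha
    obtain ⟨⟨ha1, ha2⟩, -⟩ := ha
    have hasq : a * a ≤ n := (pvSq_iff n a hn ha1).mpr ha2
    rw [List.mem_reverse, pvLargeL, List.mem_map] at hb
    obtain ⟨j, hj, rfl⟩ := hb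
    rw [List.mem_filter, PySem.List.mem_pyRange_one] at hj
    obtain ⟨⟨hj1, hj2⟩, hj3⟩ := hj
    simp only [Bool.and_eq_true, beq_iff_eq, Bool.not_eq_true', beq_eq_false_iff_ne] at hj3
    obtain ⟨hjm, hjne⟩ := hj3
    have hdvd : j ∣ n := (PySem.Int.mod_eq_zero_iff_dvd n j).mp hjm
    have hfd : PySem.Int.floordiv n j = n / j := PySem.Int.floordiv_eq_ediv_of_pos (by omega)
    obtain ⟨hc1, hc2, hc3⟩ := pvCofactor_ge_one hn hj1 hdvd
    have hjsq : j * j ≤ n := (pvSq_iff n j hn hj1).mpr hj2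
    have hjsq' : j * j < n := lt_of_le_of_ne hjsq hjne
    have hjc : j < n / j := by nlinarith [hc3, hjsq']
    have hcc : n < (n / j) * (n / j) := by nlinarith [hc3, hjc, hc1]
    rw [hfd]
    nlinarith [hasq, hcc]
  have hpw : (pvSmallL n 1 ++ (pvLargeL n 1).reverse).Pairwise (· < ·) :=
    List.pairwise_append.mpr ⟨hsmall_pw, hlarge_pw, hcross⟩
  have hpw2 : (pvDs n).Pairwise (· < ·) :=
    List.Pairwise.sublist List.filter_sublist (PySem.List.pairwise_lt_pyRange_one 1 (n + 1))
  have hnd1 : (pvSmallL n 1 ++ (pvLargeL n 1).reverse).Nodup := hpw.imp ne_of_lt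
  have hnd2 : (pvDs n).Nodup := hpw2.imp ne_of_lt
  have hperm : (pvSmallL n 1 ++ (pvLargeL n 1).reverse).Perm (pvDs n) :=
    (List.perm_ext_iff_of_nodup hnd1 hnd2).mpr (pvMem_divB n hn)
  exact List.Perm.eq_of_pairwise (fun a b _ _ h1 h2 => le_antisymm h1 h2)
    (hpw.imp le_of_lt) (hpw2.imp le_of_lt) hperm

-- ===== VERDICT (by name: the statement is the Claim_ definition above) =====
theorem beerRefrigerator_spec : Claim_equal_beerRefrigerator := by
  intro n _ hn
  unfold Spec_beerRefrigerator beerRefrigerator beerRefrigerator_alt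
  simp only []
  rw [show (PySem.List.pyRange 1 (n + 1) 1).filter (fun i => PySem.Int.mod n i == 0) = pvDs n from rfl]
  rw [show (pvDivLoop n 1 [] []).1 ++ (pvDivLoop n 1 [] []).2.reverse = pvDs n from pvDivB_eq n hn]
  rw [pvA_loops n hn, pvB_loops n]
  obtain ⟨c, t, hct⟩ : ∃ c t, pvC n = c :: t := by
    cases h : pvC n with
    | nil => exact absurd h (pvC_ne_nil n hn)
    | cons c t => exact ⟨c, t, rfl⟩
  rw [hct]
  simp only [List.map_cons, List.foldl_cons]
  rw [PySem.List.min?_id_cons]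
  show pvWhileReturn _ ((c :: t).map Prod.fst) ((c :: t).map Prod.snd) =
    (match t.foldl pvStep (pvStep none c) with | none => "" | some b => b.2)
  rw [show pvStep none c = some c from rfl, pvFoldl_step_some t c]
  exact pvWhile_pick t c _ rfl
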